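-- pv_equiv track=rewrite | github.com/wenima/codewars | kyu5/src/csv_columns.py | csv_columns
-- ===== SOURCE A (Python) =====
-- def csv_columns(csv, indeces):
--     indeces = sorted(set(indeces))
--     #split csv into lists
--     ld = [l.split(',') for l in csv.splitlines()]
--     #generate list of output strings
--     out_csv = []
--     for l in ld:
--         for i in indeces:
--             if i >= len(ld[0]):
--                 break
--             out_csv.append(l[i])
--             out_csv.append(',')
--         if len(out_csv):
--             out_csv[-1] = '\n'
--     if len(out_csv):
--         del out_csv[-1]
--     return ''.join(out_csv) if out_csv else ""
-- ===== SOURCE B (Python) =====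
-- def csv_columns(csv, indeces):
--     rows = [l.split(',') for l in csv.splitlines()]
--     if not rows:
--         return ""
--     valid = [i for i in sorted(set(indeces)) if i < len(rows[0])]
--     cols = [[row[i] for row in rows] for i in valid]
--     return '\n'.join(','.join(cells) for cells in zip(*cols))
-- ===== Notes on version B (the rewrite author's own statement) =====
-- stated objective: alternative
-- what changed: B traverses the data column-major: it extracts each selected column as a list, transposes the column lists back into rows with zip(*cols), and joins; A traverses row-major, interleaving cells and separator tokens into one flat list with an in-loop break, last-token overwrite and trailing-token deletion.
import Mathlib
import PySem

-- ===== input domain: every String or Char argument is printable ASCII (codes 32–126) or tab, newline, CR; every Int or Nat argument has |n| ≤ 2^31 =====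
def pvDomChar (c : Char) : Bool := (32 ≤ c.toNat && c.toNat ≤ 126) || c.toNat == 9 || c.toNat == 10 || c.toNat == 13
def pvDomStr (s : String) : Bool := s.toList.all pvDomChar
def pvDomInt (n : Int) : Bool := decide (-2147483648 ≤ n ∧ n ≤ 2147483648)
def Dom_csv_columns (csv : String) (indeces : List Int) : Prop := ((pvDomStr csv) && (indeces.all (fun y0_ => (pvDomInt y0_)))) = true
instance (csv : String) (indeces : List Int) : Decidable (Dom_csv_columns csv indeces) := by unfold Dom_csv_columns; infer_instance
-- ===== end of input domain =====

-- B traverses the data column-major: each selected column is extracted as a list, the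
-- column lists are transposed back into rows (zip(*cols)) and joined; A traverses
-- row-major with a flat token list, in-loop break, last-token overwrite and trailing
-- deletion. Equivalence is about the return value only.

-- ===== PORT A =====
-- inner 'for i in indeces: if i >= len(ld[0]): break; out.append(l[i]); out.append(',')'
def pvInnerA (n0 : Nat) (l : List (List Char)) : List Int → List (List Char) → List (List Char)
  | [], out => out
  | i :: rest, out =>
    if (n0 : Int) ≤ i then out
    else pvInnerA n0 l rest (out ++ [PySem.List.pyGetD l i []] ++ [[',']])

def csv_columns (csv : String) (indeces : List Int) : String :=
  let idx := PySem.List.sorted (PySem.Set.ofList indeces) (fun x => x)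
  let ld := (PySem.Chars.splitlines csv.toList).map (fun l => PySem.Chars.splitOn l [','])
  let out := ld.foldl (fun out l =>
    let out := pvInnerA (PySem.List.pyGetD ld 0 []).length l idx out
    if out.length ≠ 0 then PySem.List.pySetD out (-1) ['\n'] else out) []
  let out := if out.length ≠ 0 then out.dropLast else out
  if out ≠ [] then String.ofList (PySem.Chars.join [] out) else ""

-- ===== PORT B =====
-- Python's zip(*cols): stop as soon as any column is exhausted (or there are no columns)
def pvZipStar (cols : List (List (List Char))) : List (List (List Char)) :=
  if h : cols.isEmpty || cols.any (·.isEmpty) then []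
  else (cols.map (fun c => c.headD [])) :: pvZipStar (cols.map (fun c => c.tail))
termination_by (cols.headD []).length
decreasing_by
  cases cols with
  | nil => simp at h
  | cons c rest =>
    simp only [List.isEmpty_cons, List.any_cons, Bool.false_or, Bool.or_eq_true,
      List.isEmpty_iff, List.any_eq_true] at h
    push_neg at h
    have hc : c ≠ [] := h.1
    simp only [List.map_cons, List.headD_cons]
    cases c with
    | nil => exact absurd rfl hc
    | cons a t => simp

def csv_columns_alt (csv : String) (indeces : List Int) : String :=
  match (PySem.Chars.splitlines csv.toList).map (fun l => PySem.Chars.splitOn l [',']) with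
  | [] => ""  -- 'if not rows: return ""'
  | r :: rest =>  -- rows = r :: rest, so len(rows[0]) = r.length
    let valid := (PySem.List.sorted (PySem.Set.ofList indeces) (fun x => x)).filter
      (fun i => i < (r.length : Int))
    let cols := valid.map (fun i => (r :: rest).map (fun row => PySem.List.pyGetD row i []))
    String.ofList (PySem.Chars.join ['\n']
      ((pvZipStar cols).map (fun cells => PySem.Chars.join [','] cells)))

-- ===== PRECONDITION & SPEC =====
-- Pre_ excludes exactly the inputs where Python A raises IndexError: a selected column
-- index (below the first row's width) that is out of Python's index range for some row.
def Pre_csv_columns (csv : String) (indeces : List Int) : Prop :=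
  ∀ l ∈ (PySem.Chars.splitlines csv.toList).map (fun l => PySem.Chars.splitOn l [',']),
    ∀ i ∈ indeces,
      i < ((((PySem.Chars.splitlines csv.toList).map (fun l => PySem.Chars.splitOn l [','])).headD []).length : Int) →
        PySem.Raise.InRange l.length i
instance (csv : String) (indeces : List Int) : Decidable (Pre_csv_columns csv indeces) := by
  unfold Pre_csv_columns; infer_instance

def pvWitness_csv_columns : String × List Int := ("a,b\nc,d", [0, -1])

def Spec_csv_columns (csv : String) (indeces : List Int) (out : String) : Prop := out = csv_columns_alt csv indeces
instance (csv : String) (indeces : List Int) (out : String) : Decidable (Spec_csv_columns csv indeces out) := by unfold Spec_csv_columns; infer_instance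

-- ===== CLAIM (what is proved, stated in full; the proofs are below) =====
def Claim_equal_csv_columns : Prop := ∀ (csv : String) (indeces : List Int), Dom_csv_columns csv indeces → Pre_csv_columns csv indeces → Spec_csv_columns csv indeces (csv_columns csv indeces)

-- ===== LEMMAS AND PROOFS =====

-- ''.join over char-lists is flatten
theorem pvJoinNil (ys : List (List Char)) : PySem.Chars.join [] ys = ys.flatten := by
  induction ys with
  | nil => simp [PySem.Chars.join, List.intercalate]
  | cons a t ih => cases t <;> simp_all [PySem.Chars.join, List.intercalate]

-- overwriting the last element, as A's out_csv[-1] = '\n' does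
theorem pvSetLast (ys : List (List Char)) (x v : List Char) :
    PySem.List.pySetD (ys ++ [x]) (-1) v = ys ++ [v] := by
  simp [PySem.List.pySetD, PySem.List.pySet?, PySem.List.pyIdx?]

-- the interleaved cell/comma tokens of one row, as intersperse plus a trailing comma
theorem pvFlatMapPair (v : List Int) (a : Int → List Char) (c : List Char) (hv : v ≠ []) :
    v.flatMap (fun i => [a i, c]) = ((v.map a).intersperse c) ++ [c] := by
  induction v with
  | nil => simp at hv
  | cons i t ih => cases t <;> simp_all

-- A's inner loop with break: on a strictly increasing index list it collects exactly
-- the indices below the first row's width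
theorem pvInnerEq (n0 : Nat) (l : List (List Char)) :
    ∀ (idx : List Int), idx.Pairwise (· < ·) → ∀ out,
    pvInnerA n0 l idx out
      = out ++ (idx.filter (fun i => decide (i < (n0 : Int)))).flatMap
          (fun i => [PySem.List.pyGetD l i [], [',']]) := by
  intro idx
  induction idx with
  | nil => intro _ out; simp [pvInnerA]
  | cons i rest ih =>
    intro hp out
    rcases List.pairwise_cons.mp hp with ⟨h1, h2⟩
    by_cases hbr : (n0 : Int) ≤ i
    · have hrest : rest.filter (fun j => decide (j < (n0 : Int))) = [] := by
        apply List.filter_eq_nil_iff.mpr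
        intro j hj
        have := h1 j hj
        simp; omega
      simp [pvInnerA, hbr, hrest, show ¬ (i < (n0 : Int)) by omega]
    · have hi : i < (n0 : Int) := by omega
      rw [pvInnerA, if_neg hbr, ih h2]
      simp [hi]

-- A's row loop, when at least one index is valid
theorem pvFoldEq (n0 : Nat) (idx : List Int) (hp : idx.Pairwise (· < ·))
    (hv : idx.filter (fun i => decide (i < (n0 : Int))) ≠ []) :
    ∀ (rows : List (List (List Char))) (out0 : List (List Char)),
    rows.foldl (fun out l =>
        let out := pvInnerA n0 l idx out
        if out.length ≠ 0 then PySem.List.pySetD out (-1) ['\n'] else out) out0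
      = out0 ++ rows.flatMap (fun l =>
          ((idx.filter (fun i => decide (i < (n0 : Int)))).map
            (fun i => PySem.List.pyGetD l i [])).intersperse [','] ++ [['\n']]) := by
  intro rows
  induction rows with
  | nil => intro out0; simp
  | cons l rest ih =>
    intro out0
    have hstep : pvInnerA n0 l idx out0
        = (out0 ++ ((idx.filter (fun i => decide (i < (n0 : Int)))).map
            (fun i => PySem.List.pyGetD l i [])).intersperse [',']) ++ [[',']] := by
      rw [pvInnerEq n0 l idx hp out0,
          pvFlatMapPair _ (fun i => PySem.List.pyGetD l i []) [','] hv]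
      simp
    rw [List.foldl_cons]
    simp only [hstep]
    rw [if_pos (by simp), pvSetLast, ih]
    simp

-- when no index is valid, A's out_csv stays empty through the whole row loop
theorem pvFoldEmpty (n0 : Nat) (idx : List Int) (hp : idx.Pairwise (· < ·))
    (hv : idx.filter (fun i => decide (i < (n0 : Int))) = []) :
    ∀ (rows : List (List (List Char))),
    rows.foldl (fun out l =>
        let out := pvInnerA n0 l idx out
        if out.length ≠ 0 then PySem.List.pySetD out (-1) ['\n'] else out) []
      = [] := by
  intro rows
  induction rows with
  | nil => rfl
  | cons l rest ih =>
    rw [List.foldl_cons]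
    have h0 : pvInnerA n0 l idx [] = [] := by
      rw [pvInnerEq n0 l idx hp [], hv]; rfl
    simpa [h0] using ih

-- B's transpose of column-major extraction is the row-major selection
theorem pvZipCols (valid : List Int) (hval : valid ≠ [])
    (g : Int → List (List Char) → List Char) :
    ∀ rows : List (List (List Char)),
    pvZipStar (valid.map (fun i => rows.map (g i)))
      = rows.map (fun row => valid.map (fun i => g i row)) := by
  intro rows
  induction rows with
  | nil =>
    rw [pvZipStar, dif_pos]
    · simp
    · cases valid with
      | nil => exact absurd rfl hval
      | cons i t => simp
  | cons r rs ih =>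
    rw [pvZipStar, dif_neg]
    · have h1 : (valid.map (fun i => (r :: rs).map (g i))).map (fun c => c.headD [])
          = valid.map (fun i => g i r) := by
        simp [List.map_map, Function.comp]
      have h2 : (valid.map (fun i => (r :: rs).map (g i))).map (fun c => c.tail)
          = valid.map (fun i => rs.map (g i)) := by
        simp [List.map_map, Function.comp]
      rw [h1, h2, ih]
      simp
    · cases valid with
      | nil => exact absurd rfl hval
      | cons i t =>
        simp [List.any_map, Function.comp]

-- newline-terminated blocks, with the last newline dropped, are a newline join
theorem pvJoinBlocks (F : List (List Char) → List (List Char)) :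
    ∀ (rows : List (List (List Char))), rows ≠ [] →
    PySem.Chars.join [] ((rows.flatMap (fun r => F r ++ [['\n']])).dropLast)
      = PySem.Chars.join ['\n'] (rows.map (fun r => (F r).flatten)) := by
  intro rows
  induction rows with
  | nil => intro h; simp at h
  | cons r rest ih =>
    intro _
    cases rest with
    | nil => simp [pvJoinNil, PySem.Chars.join_singleton]
    | cons r2 rest2 =>
      have htail : (r2 :: rest2).flatMap (fun r => F r ++ [['\n']]) ≠ [] := by
        simp [List.flatMap_cons]
      have ihh := ih (by simp)
      simp only [List.map_cons] at ihh ⊢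
      rw [List.flatMap_cons, List.dropLast_append_of_ne_nil htail,
          PySem.Chars.join_cons_cons, ← ihh]
      simp [pvJoinNil]

theorem pvBlocksNeNil (F : List (List Char) → List (List Char))
    (hF : ∀ r, F r ≠ []) (rows : List (List (List Char))) (hrows : rows ≠ []) :
    (rows.flatMap (fun r => F r ++ [['\n']])).dropLast ≠ [] := by
  cases rows with
  | nil => exact absurd rfl hrows
  | cons r rest =>
    cases rest with
    | nil =>
      simp only [List.flatMap_cons, List.flatMap_nil, List.append_nil]
      rw [List.dropLast_concat]
      exact hF r
    | cons r2 rest2 =>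
      have htail : (r2 :: rest2).flatMap (fun r => F r ++ [['\n']]) ≠ [] := by
        simp [List.flatMap_cons]
      rw [List.flatMap_cons, List.dropLast_append_of_ne_nil htail]
      simp [hF r]

-- ===== VERDICT (by name: the statement is the Claim_ definition above) =====
theorem csv_columns_spec : Claim_equal_csv_columns := by
  intro csv indeces _ _
  unfold Spec_csv_columns csv_columns csv_columns_alt
  set idx := PySem.List.sorted (PySem.Set.ofList indeces) (fun x => x) with hidx
  have hp : idx.Pairwise (· < ·) := PySem.List.sorted_ofList_pairwise_lt indeces
  set ld := (PySem.Chars.splitlines csv.toList).map (fun l => PySem.Chars.splitOn l [','])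
  cases ld with
  | nil => simp
  | cons r rest =>
    simp only [PySem.List.pyGetD_zero_cons]
    by_cases hv : idx.filter (fun i => decide (i < (r.length : Int))) = []
    · rw [pvFoldEmpty r.length idx hp hv]
      have hz : pvZipStar ([] : List (List (List Char))) = [] := by
        rw [pvZipStar]; simp
      simp [hv, hz, PySem.Chars.join, List.intercalate]
    · have hIne : ∀ l : List (List Char),
          ((idx.filter (fun i => decide (i < (r.length : Int)))).map
            (fun i => PySem.List.pyGetD l i [])).intersperse [','] ≠ [] := by
        intro l h
        cases hm : (idx.filter (fun i => decide (i < (r.length : Int)))).map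
            (fun i => PySem.List.pyGetD l i []) with
        | nil => exact hv (List.map_eq_nil_iff.mp hm)
        | cons a t => cases t <;> simp [hm] at h
      rw [pvFoldEq r.length idx hp hv, List.nil_append]
      rw [pvZipCols _ hv (fun i row => PySem.List.pyGetD row i []) (r :: rest)]
      have h1 : ((r :: rest).flatMap (fun l =>
          ((idx.filter (fun i => decide (i < (r.length : Int)))).map
            (fun i => PySem.List.pyGetD l i [])).intersperse [','] ++ [['\n']])).length ≠ 0 := by
        simp [List.flatMap_cons]
      have h2 := pvBlocksNeNil (fun l =>
          ((idx.filter (fun i => decide (i < (r.length : Int)))).map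
            (fun i => PySem.List.pyGetD l i [])).intersperse [','])
          hIne (r :: rest) (by simp)
      rw [if_pos h1, if_pos h2,
          pvJoinBlocks (fun l =>
            ((idx.filter (fun i => decide (i < (r.length : Int)))).map
              (fun i => PySem.List.pyGetD l i [])).intersperse [','])
            (r :: rest) (by simp)]
      simp only [List.map_map]
      simp [PySem.Chars.join, List.intercalate, Function.comp]
      rfl
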